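-- pv_equiv track=rewrite | github.com/Corteil/Yukon | archive/robot_gui.py | _sel_item_y
-- ===== SOURCE A (Python) =====
-- _CFG_FIELDS = [
--     ("robot", ["yukon_port", "ibus_port"]),
--     ("rc",    ["throttle_ch", "steer_ch", "mode_ch", "speed_ch",
--                "auto_type_ch", "gps_log_ch", "deadzone",
--                "failsafe_s", "speed_min", "control_hz"]),
--     ("gui",   ["fps"]),
--     ("camera",["disabled", "width", "height", "fps", "rotation"]),
--     ("aruco", ["enabled", "dict", "calib_file", "tag_size"]),
--     ("lidar", ["disabled", "port"]),
--     ("gps",   ["disabled", "port", "log_dir", "log_hz"]),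
--     ("ntrip", ["disabled", "host", "port", "mount", "user", "password"]),
--     ("rtcm",  ["disabled", "port", "baud"]),
--     ("navigator", ["max_gates", "pass_distance", "pass_time",
--                    "search_speed", "search_step_deg", "fwd_speed",
--                    "steer_kp", "imu_kp", "align_deadband"]),
-- ]
--
-- _CFG_LEFT_SECTS = 3
--
-- def _sel_item_y(flat_idx):
--     """Pixel y-offset of flat_idx relative to start_y (before scroll applied)."""
--     ROW_H = 20
--     GAP   = 8
--     fi    = 0
--     y_cols = [0, 0]
--     for si, (section, keys) in enumerate(_CFG_FIELDS):
--         col = 0 if si < _CFG_LEFT_SECTS else 1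
--         y_cols[col] += ROW_H
--         for key in keys:
--             if fi == flat_idx:
--                 return y_cols[col]
--             y_cols[col] += ROW_H - 2
--             fi += 1
--         y_cols[col] += GAP
--     return 0
-- ===== SOURCE B (Python) =====
-- _CFG_FIELDS = [
--     ("robot", ["yukon_port", "ibus_port"]),
--     ("rc",    ["throttle_ch", "steer_ch", "mode_ch", "speed_ch",
--                "auto_type_ch", "gps_log_ch", "deadzone",
--                "failsafe_s", "speed_min", "control_hz"]),
--     ("gui",   ["fps"]),
--     ("camera",["disabled", "width", "height", "fps", "rotation"]),
--     ("aruco", ["enabled", "dict", "calib_file", "tag_size"]),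
--     ("lidar", ["disabled", "port"]),
--     ("gps",   ["disabled", "port", "log_dir", "log_hz"]),
--     ("ntrip", ["disabled", "host", "port", "mount", "user", "password"]),
--     ("rtcm",  ["disabled", "port", "baud"]),
--     ("navigator", ["max_gates", "pass_distance", "pass_time",
--                    "search_speed", "search_step_deg", "fwd_speed",
--                    "steer_kp", "imu_kp", "align_deadband"]),
-- ]
--
-- _CFG_LEFT_SECTS = 3
--
-- def _sel_item_y(flat_idx):
--     """Pixel y-offset of flat_idx relative to start_y (before scroll applied)."""
--     ROW_H = 20
--     GAP = 8
--     count = 0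
--     y_cols = [0, 0]
--     for si, (section, keys) in enumerate(_CFG_FIELDS):
--         col = 0 if si < _CFG_LEFT_SECTS else 1
--         n = len(keys)
--         if count <= flat_idx < count + n:
--             return y_cols[col] + ROW_H + (flat_idx - count) * (ROW_H - 2)
--         count += n
--         y_cols[col] += ROW_H + n * (ROW_H - 2) + GAP
--     return 0
-- ===== Notes on version B (the rewrite author's own statement) =====
-- stated objective: simpler
-- what changed: B replaces the per-key inner loop and the running fi counter with section-level arithmetic: one pass over _CFG_FIELDS keeping a flat-field count and per-column running y, computing the hit offset in closed form from len(keys).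
import Mathlib
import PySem

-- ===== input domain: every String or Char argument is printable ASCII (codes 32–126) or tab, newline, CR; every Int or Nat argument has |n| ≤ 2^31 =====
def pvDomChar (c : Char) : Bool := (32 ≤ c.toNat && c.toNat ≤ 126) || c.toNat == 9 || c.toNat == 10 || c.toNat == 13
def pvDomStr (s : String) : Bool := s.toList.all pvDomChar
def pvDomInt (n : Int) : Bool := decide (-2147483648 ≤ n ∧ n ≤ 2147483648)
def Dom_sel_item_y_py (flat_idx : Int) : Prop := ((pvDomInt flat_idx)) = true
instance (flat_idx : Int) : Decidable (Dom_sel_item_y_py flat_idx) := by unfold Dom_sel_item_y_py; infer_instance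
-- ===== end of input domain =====

-- B replaces A's per-key inner loop and fi counter by section-level arithmetic on len(keys); objective: simpler.

-- _CFG_FIELDS (module constant shared by both ports)
def cfgFields : List (String × List String) := [
  ("robot", ["yukon_port", "ibus_port"]),
  ("rc", ["throttle_ch", "steer_ch", "mode_ch", "speed_ch", "auto_type_ch", "gps_log_ch", "deadzone", "failsafe_s", "speed_min", "control_hz"]),
  ("gui", ["fps"]),
  ("camera", ["disabled", "width", "height", "fps", "rotation"]),
  ("aruco", ["enabled", "dict", "calib_file", "tag_size"]),
  ("lidar", ["disabled", "port"]),
  ("gps", ["disabled", "port", "log_dir", "log_hz"]),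
  ("ntrip", ["disabled", "host", "port", "mount", "user", "password"]),
  ("rtcm", ["disabled", "port", "baud"]),
  ("navigator", ["max_gates", "pass_distance", "pass_time", "search_speed", "search_step_deg", "fwd_speed", "steer_kp", "imu_kp", "align_deadband"])]

-- ===== PORT A =====
-- inner 'for key in keys' loop: .inl y = early return, .inr (fi, y) = loop finished
def aInner (keys : List String) (fi y flat : Int) : Sum Int (Int × Int) :=
  match keys with
  | [] => .inr (fi, y)
  | _ :: ks => if fi = flat then .inl y else aInner ks (fi + 1) (y + (20 - 2)) flat

-- outer loop over enumerate(_CFG_FIELDS); state fi, y_cols = (y0, y1)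
def aOuter (rows : List (String × List String)) (si fi y0 y1 flat : Int) : Int :=
  match rows with
  | [] => 0
  | (_, keys) :: rest =>
    if si < 3 then  -- col = 0
      match aInner keys fi (y0 + 20) flat with
      | .inl r => r
      | .inr (fi', y') => aOuter rest (si + 1) fi' (y' + 8) y1 flat
    else            -- col = 1
      match aInner keys fi (y1 + 20) flat with
      | .inl r => r
      | .inr (fi', y') => aOuter rest (si + 1) fi' y0 (y' + 8) flat

def sel_item_y_py (flat_idx : Int) : Int :=
  aOuter cfgFields 0 0 0 0 flat_idx

-- ===== PORT B =====
-- one pass at section level: running field count and per-column running y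
def bLoop (rows : List (String × List String)) (si count y0 y1 flat : Int) : Int :=
  match rows with
  | [] => 0
  | (_, keys) :: rest =>
    let n : Int := keys.length
    if si < 3 then
      if count ≤ flat ∧ flat < count + n then y0 + 20 + (flat - count) * (20 - 2)
      else bLoop rest (si + 1) (count + n) (y0 + 20 + n * (20 - 2) + 8) y1 flat
    else
      if count ≤ flat ∧ flat < count + n then y1 + 20 + (flat - count) * (20 - 2)
      else bLoop rest (si + 1) (count + n) y0 (y1 + 20 + n * (20 - 2) + 8) flat

def sel_item_y_py_alt (flat_idx : Int) : Int :=
  bLoop cfgFields 0 0 0 0 flat_idx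

-- ===== PRECONDITION & SPEC =====
def Spec_sel_item_y_py (flat_idx : Int) (out : Int) : Prop := out = sel_item_y_py_alt flat_idx
instance (flat_idx : Int) (out : Int) : Decidable (Spec_sel_item_y_py flat_idx out) := by unfold Spec_sel_item_y_py; infer_instance

-- ===== CLAIM (what is proved, stated in full; the proofs are below) =====
def Claim_equal_sel_item_y_py : Prop := ∀ (flat_idx : Int), Dom_sel_item_y_py flat_idx → Spec_sel_item_y_py flat_idx (sel_item_y_py flat_idx)

-- ===== LEMMAS AND PROOFS =====

-- A's inner loop falls through when flat is outside [fi, fi + len keys)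
theorem aInner_skip (keys : List String) (fi y flat : Int)
    (h : flat < fi ∨ fi + keys.length ≤ flat) :
    aInner keys fi y flat = .inr (fi + keys.length, y + keys.length * (20 - 2)) := by
  induction keys generalizing fi y with
  | nil => simp [aInner]
  | cons k ks ih =>
    have hlen : (((k :: ks).length : Int)) = (ks.length : Int) + 1 := by
      push_cast [List.length_cons]; ring
    rw [aInner, if_neg (by omega), ih (fi + 1) _ (by omega)]
    simp only [Sum.inr.injEq, Prod.mk.injEq, hlen]
    constructor <;> ring

-- A's inner loop hits when fi ≤ flat < fi + len keys, at offset (flat - fi)*(20-2)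
theorem aInner_hit (keys : List String) (fi y flat : Int)
    (h : fi ≤ flat ∧ flat < fi + keys.length) :
    aInner keys fi y flat = .inl (y + (flat - fi) * (20 - 2)) := by
  induction keys generalizing fi y with
  | nil => simp at h; omega
  | cons k ks ih =>
    have hlen : (((k :: ks).length : Int)) = (ks.length : Int) + 1 := by
      push_cast [List.length_cons]; ring
    by_cases hf : fi = flat
    · subst hf
      rw [aInner, if_pos rfl]
      norm_num
    · rw [aInner, if_neg hf, ih (fi + 1) _ (by omega)]
      simp only [Sum.inl.injEq]
      ring

-- the loop states correspond exactly (count = fi, same y columns), so the loops agree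
theorem loops_agree (rows : List (String × List String)) (si fi y0 y1 flat : Int) :
    aOuter rows si fi y0 y1 flat = bLoop rows si fi y0 y1 flat := by
  induction rows generalizing si fi y0 y1 with
  | nil => rfl
  | cons r rest ih =>
    obtain ⟨sec, keys⟩ := r
    by_cases hsi : si < 3 <;>
      by_cases hhit : fi ≤ flat ∧ flat < fi + (keys.length : Int)
    · have ha := aInner_hit keys fi (y0 + 20) flat hhit
      simp only [aOuter, bLoop, ha, if_pos hsi, if_pos hhit]
    · have ha := aInner_skip keys fi (y0 + 20) flat (by omega)
      simp only [aOuter, bLoop, ha, if_pos hsi, if_neg hhit, ih]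
    · have ha := aInner_hit keys fi (y1 + 20) flat hhit
      simp only [aOuter, bLoop, ha, if_neg hsi, if_pos hhit]
    · have ha := aInner_skip keys fi (y1 + 20) flat (by omega)
      simp only [aOuter, bLoop, ha, if_neg hsi, if_neg hhit, ih]

-- ===== VERDICT (by name: the statement is the Claim_ definition above) =====
theorem sel_item_y_py_spec : Claim_equal_sel_item_y_py := by
  intro flat _
  unfold Spec_sel_item_y_py
  exact loops_agree cfgFields 0 0 0 0 flat
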